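-- pv_equiv track=rewrite | github.com/tonisad1180/scivly | backend/app/webhooks.py | normalize_webhook_events
-- ===== SOURCE A (Python) =====
-- from typing import Sequence
--
-- SUPPORTED_WEBHOOK_EVENTS: tuple[str, ...] = (
--     "paper.matched",
--     "paper.enriched",
--     "digest.ready",
--     "digest.delivered",
-- )
--
-- def normalize_webhook_events(events: Sequence[str] | None) -> list[str]:
--     if not events:
--         return list(SUPPORTED_WEBHOOK_EVENTS)
--
--     normalized: list[str] = []
--     seen: set[str] = set()
--     for raw_event in events:
--         event = raw_event.strip()
--         if not event:
--             continue
--         if event not in SUPPORTED_WEBHOOK_EVENTS: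
--             raise ValueError(f"Unsupported webhook event: {event}")
--         if event in seen:
--             continue
--         seen.add(event)
--         normalized.append(event)
--
--     if not normalized:
--         return list(SUPPORTED_WEBHOOK_EVENTS)
--     return normalized
-- ===== SOURCE B (Python) =====
-- from typing import Sequence
--
-- SUPPORTED_WEBHOOK_EVENTS: tuple[str, ...] = (
--     "paper.matched",
--     "paper.enriched",
--     "digest.ready",
--     "digest.delivered",
-- )
--
-- def normalize_webhook_events(events: Sequence[str] | None) -> list[str]:
--     if not events:
--         return list(SUPPORTED_WEBHOOK_EVENTS)
--     result: list[str] = []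
--     pending = list(events)
--     while pending:
--         head = pending[0].strip()
--         pending = pending[1:]
--         if not head:
--             continue
--         if head not in SUPPORTED_WEBHOOK_EVENTS:
--             raise ValueError(f"Unsupported webhook event: {head}")
--         result.append(head)
--         pending = [r for r in pending if r.strip() != head]
--     return result or list(SUPPORTED_WEBHOOK_EVENTS)
-- ===== Notes on version B (the rewrite author's own statement) =====
-- stated objective: alternative
-- what changed: Replaces A's fused loop that carries a 'seen' set with a worklist algorithm: after emitting an event it filters all later occurrences of that event out of the remaining worklist, so no auxiliary seen-set or membership state exists at all.
import Mathlib
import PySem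

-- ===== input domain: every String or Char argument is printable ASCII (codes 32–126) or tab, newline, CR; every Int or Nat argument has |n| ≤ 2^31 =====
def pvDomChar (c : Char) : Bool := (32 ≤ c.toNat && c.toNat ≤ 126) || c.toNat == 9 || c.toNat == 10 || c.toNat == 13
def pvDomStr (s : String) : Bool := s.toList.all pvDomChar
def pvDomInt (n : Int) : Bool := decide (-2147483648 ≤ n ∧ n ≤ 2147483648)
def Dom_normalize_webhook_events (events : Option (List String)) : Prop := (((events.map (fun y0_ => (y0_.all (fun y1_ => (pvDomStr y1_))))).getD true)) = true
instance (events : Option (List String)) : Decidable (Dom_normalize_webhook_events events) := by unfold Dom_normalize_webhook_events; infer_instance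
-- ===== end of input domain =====

-- B replaces A's fused loop with a 'seen' set by a worklist algorithm that, after
-- emitting an event, filters its later occurrences out of the remaining worklist;
-- objective: alternative (no seen-set state). Return-value equivalence only.

def SUPPORTED_WEBHOOK_EVENTS : List String :=
  ["paper.matched", "paper.enriched", "digest.ready", "digest.delivered"]

-- ===== PORT A =====
-- A's loop: state = (normalized, seen); on an unsupported event Python raises
-- ValueError — modelled as returning [] there (excluded by Pre_).
def pvLoopA (evs : List String) (normalized : List String) (seen : PySem.Set String) :
    List String :=
  match evs with
  | [] => normalized
  | raw :: rest =>
    let event := PySem.Str.strip raw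
    if event = "" then pvLoopA rest normalized seen
    else if ¬ SUPPORTED_WEBHOOK_EVENTS.contains event then []  -- raise ValueError
    else if PySem.Set.contains seen event then pvLoopA rest normalized seen
    else pvLoopA rest (normalized ++ [event]) (PySem.Set.add seen event)

def normalize_webhook_events (events : Option (List String)) : List String :=
  match events with
  | none => SUPPORTED_WEBHOOK_EVENTS
  | some l =>
    if l = [] then SUPPORTED_WEBHOOK_EVENTS
    else
      let normalized := pvLoopA l [] PySem.Set.empty
      if normalized = [] then SUPPORTED_WEBHOOK_EVENTS else normalized

-- ===== PORT B =====
-- B's while loop over the shrinking worklist 'pending', as structural recursion on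
-- its length: emit the stripped head and purge its later occurrences from the
-- worklist; an unsupported event raises ValueError — modelled as [] (excluded by Pre_).
def pvGoB (pending : List String) : List String :=
  match pending with
  | [] => []
  | raw :: rest =>
    let head := PySem.Str.strip raw
    if head = "" then pvGoB rest
    else if ¬ SUPPORTED_WEBHOOK_EVENTS.contains head then []  -- raise ValueError
    else head :: pvGoB (rest.filter (fun r => PySem.Str.strip r ≠ head))
  termination_by pending.length
  decreasing_by
    · simp
    · simp only [List.length_unattach]
      exact Nat.lt_succ_of_le (le_trans (List.length_filter_le _ _) (by simp))

def normalize_webhook_events_alt (events : Option (List String)) : List String :=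
  match events with
  | none => SUPPORTED_WEBHOOK_EVENTS
  | some l =>
    if l = [] then SUPPORTED_WEBHOOK_EVENTS
    else
      let result := pvGoB l
      if result = [] then SUPPORTED_WEBHOOK_EVENTS else result

-- ===== PRECONDITION & SPEC =====
-- Pre_ excludes exactly the inputs on which A raises ValueError: some event whose
-- strip is nonempty and not a supported webhook event.
def Pre_normalize_webhook_events (events : Option (List String)) : Prop :=
  ∀ e ∈ events.getD [], PySem.Str.strip e = "" ∨ PySem.Str.strip e ∈ SUPPORTED_WEBHOOK_EVENTS

instance (events : Option (List String)) : Decidable (Pre_normalize_webhook_events events) := by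
  unfold Pre_normalize_webhook_events; infer_instance

def pvWitness_normalize_webhook_events : Option (List String) :=
  some [" paper.matched", "digest.ready", "paper.matched", ""]

def Spec_normalize_webhook_events (events : Option (List String)) (out : List String) : Prop := out = normalize_webhook_events_alt events
instance (events : Option (List String)) (out : List String) : Decidable (Spec_normalize_webhook_events events out) := by unfold Spec_normalize_webhook_events; infer_instance

-- ===== CLAIM =====
def Claim_equal_normalize_webhook_events : Prop := ∀ (events : Option (List String)), Dom_normalize_webhook_events events → Pre_normalize_webhook_events events → Spec_normalize_webhook_events events (normalize_webhook_events events)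

-- ===== LEMMAS AND PROOFS =====

-- Bridge: A's loop with seen set S equals acc ++ B's worklist run on the input with
-- the already-seen events filtered away (under Pre_'s per-element condition).
lemma pvLoopA_eq_goB (l : List String) (acc : List String) (S : PySem.Set String)
    (h : ∀ e ∈ l, PySem.Str.strip e = "" ∨ PySem.Str.strip e ∈ SUPPORTED_WEBHOOK_EVENTS) :
    pvLoopA l acc S =
      acc ++ pvGoB (l.filter (fun r => PySem.Str.strip r ∉ S)) := by
  induction l generalizing acc S with
  | nil => simp [pvLoopA, pvGoB]
  | cons raw rest ih =>
    have hrest : ∀ e ∈ rest, PySem.Str.strip e = "" ∨ PySem.Str.strip e ∈ SUPPORTED_WEBHOOK_EVENTS :=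
      fun e he => h e (by simp [he])
    by_cases hS : PySem.Str.strip raw ∈ S
    · rw [List.filter_cons_of_neg (by simp [hS])]
      by_cases he : PySem.Str.strip raw = ""
      · simp [pvLoopA, he, ih _ _ hrest]
      · have hsupp : PySem.Str.strip raw ∈ SUPPORTED_WEBHOOK_EVENTS :=
          (h raw (by simp)).resolve_left he
        simp [pvLoopA, he, hsupp, hS, ih _ _ hrest]
    · rw [List.filter_cons_of_pos (by simp [hS])]
      by_cases he : PySem.Str.strip raw = ""
      · simp [pvLoopA, pvGoB, he, ih _ _ hrest]
      · have hsupp : PySem.Str.strip raw ∈ SUPPORTED_WEBHOOK_EVENTS :=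
          (h raw (by simp)).resolve_left he
        have hfil :
            (rest.filter (fun r => PySem.Str.strip r ∉ S)).filter
                (fun r => PySem.Str.strip r ≠ PySem.Str.strip raw) =
            rest.filter (fun r => PySem.Str.strip r ∉ PySem.Set.add S (PySem.Str.strip raw)) := by
          rw [List.filter_filter]
          apply List.filter_congr
          intro x _
          by_cases h1 : PySem.Str.strip x ∈ S <;>
            by_cases h2 : PySem.Str.strip x = PySem.Str.strip raw <;>
              simp [PySem.Set.mem_add, h1, h2]
        have hA : pvLoopA (raw :: rest) acc S =
            pvLoopA rest (acc ++ [PySem.Str.strip raw]) (PySem.Set.add S (PySem.Str.strip raw)) := by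
          simp [pvLoopA, he, hsupp, hS]
        have hB : pvGoB (raw :: rest.filter (fun r => PySem.Str.strip r ∉ S)) =
            PySem.Str.strip raw ::
              pvGoB ((rest.filter (fun r => PySem.Str.strip r ∉ S)).filter
                (fun r => PySem.Str.strip r ≠ PySem.Str.strip raw)) := by
          simp [pvGoB, he, hsupp]
        rw [hA]
        rw [hB]
        rw [ih _ _ hrest]
        rw [hfil]
        simp

-- ===== VERDICT =====
theorem normalize_webhook_events_spec : Claim_equal_normalize_webhook_events := by
  intro events _ hpre
  unfold Spec_normalize_webhook_events
  match events with
  | none => rfl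
  | some l =>
    by_cases hl : l = []
    · simp [normalize_webhook_events, normalize_webhook_events_alt, hl]
    · have hpre' : ∀ e ∈ l, PySem.Str.strip e = "" ∨ PySem.Str.strip e ∈ SUPPORTED_WEBHOOK_EVENTS := hpre
      have h0 := pvLoopA_eq_goB l [] PySem.Set.empty hpre'
      have hfl : l.filter (fun r => PySem.Str.strip r ∉ PySem.Set.empty) = l := by
        apply List.filter_eq_self.mpr
        intro x _
        simp [PySem.Set.empty]
      rw [hfl] at h0
      simp only [normalize_webhook_events, normalize_webhook_events_alt, hl, ite_false, h0,
        List.nil_append]
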